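-- pv_equiv track=rewrite | github.com/dkasumagic/Surfboards | src/backend/to_kicad_sch.py | place_cells_grid
-- ===== SOURCE A (Python) =====
-- def place_cells_grid(cells):
--     coords = {}
--     per_col = 12
--     xstep = 20
--     ystep = 12
--     col = 0
--     row = 0
--     for cname in cells:
--         x = col * xstep
--         y = row * ystep
--         coords[cname] = (x, y)
--         row += 1
--         if row >= per_col:
--             row = 0
--             col += 1
--     return coords
-- ===== SOURCE B (Python) =====
-- def place_cells_grid(cells):
--     coords = {}
--     xstep = 20
--     ystep = 12
--     n = len(cells)
--     start = 0
--     col = 0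
--     while start < n:
--         for row, cname in enumerate(cells[start:start+12]):
--             coords[cname] = (col * xstep, row * ystep)
--         start += 12
--         col += 1
--     return coords
-- ===== Notes on version B (the rewrite author's own statement) =====
-- stated objective: alternative
-- what changed: Processes the cells column by column: an outer while loop over chunk start indices slices out each column of 12 and an inner enumerate assigns its rows, instead of A's single pass with mutable row/col counters and a reset branch.
import Mathlib
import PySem

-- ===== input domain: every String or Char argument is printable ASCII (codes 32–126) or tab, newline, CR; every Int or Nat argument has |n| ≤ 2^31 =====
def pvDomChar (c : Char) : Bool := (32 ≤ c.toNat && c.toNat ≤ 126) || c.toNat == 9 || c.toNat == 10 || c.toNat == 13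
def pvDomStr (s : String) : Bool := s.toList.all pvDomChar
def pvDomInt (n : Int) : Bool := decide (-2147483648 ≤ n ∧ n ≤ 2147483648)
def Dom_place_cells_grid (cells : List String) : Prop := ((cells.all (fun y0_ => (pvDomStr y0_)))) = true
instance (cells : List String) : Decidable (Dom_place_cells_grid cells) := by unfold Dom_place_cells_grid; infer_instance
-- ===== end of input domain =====

-- B chunks the cells into columns of 12 by slicing (outer loop over chunks, inner enumerate
-- over each column) instead of A's single pass with mutable row/col counters and a reset
-- branch (objective: alternative decomposition, same cost).

-- ===== PORT A =====
-- loop body of A: state is (coords, col, row)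
def pcgStepA (st : PySem.Dict String (Int × Int) × Int × Int) (cname : String) :
    PySem.Dict String (Int × Int) × Int × Int :=
  let x := st.2.1 * 20
  let y := st.2.2 * 12
  let coords := st.1.insert cname (x, y)
  let row := st.2.2 + 1
  if row ≥ 12 then (coords, st.2.1 + 1, 0) else (coords, st.2.1, row)

def place_cells_grid (cells : List String) : List (String × Int × Int) :=
  (cells.foldl pcgStepA (PySem.Dict.empty, 0, 0)).1.items

-- ===== PORT B =====
-- inner loop of B: 'for row, cname in enumerate(column): coords[cname] = (col*20, row*12)'
def pcgColumn (col : Int) (d : PySem.Dict String (Int × Int)) (column : List String) :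
    PySem.Dict String (Int × Int) :=
  (PySem.List.enumerate column 0).foldl (fun dd p => dd.insert p.2 (col * 20, p.1 * 12)) d

-- outer while loop of B over chunk start indices; cells[start:start+12] is PySem.List.slice (exact)
def pcgChunks (cells : List String) (start : Nat) (col : Int)
    (d : PySem.Dict String (Int × Int)) : PySem.Dict String (Int × Int) :=
  if h : start < cells.length then
    pcgChunks cells (start + 12) (col + 1)
      (pcgColumn col d (PySem.List.slice cells (some (start : Int)) (some ((start + 12 : Nat) : Int))))
  else d
termination_by cells.length - start
decreasing_by omega

def place_cells_grid_alt (cells : List String) : List (String × Int × Int) :=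
  (pcgChunks cells 0 0 PySem.Dict.empty).items

-- ===== PRECONDITION & SPEC =====
def Spec_place_cells_grid (cells : List String) (out : List (String × Int × Int)) : Prop := out = place_cells_grid_alt cells
instance (cells : List String) (out : List (String × Int × Int)) : Decidable (Spec_place_cells_grid cells out) := by unfold Spec_place_cells_grid; infer_instance

-- ===== CLAIM (what is proved, stated in full; the proofs are below) =====
def Claim_equal_place_cells_grid : Prop := ∀ (cells : List String), Dom_place_cells_grid cells → Spec_place_cells_grid cells (place_cells_grid cells)

-- ===== LEMMAS AND PROOFS =====

-- Within one column (≤ 12 cells, starting at row r), A's fold is B's enumerate-fold,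
-- and A's counters end at (col+1, 0) exactly when the column fills up.
theorem pcg_chunk (xs : List String) :
    ∀ (d : PySem.Dict String (Int × Int)) (col : Int) (r : Nat),
      r + xs.length ≤ 12 → r < 12 →
      xs.foldl pcgStepA (d, col, (r : Int)) =
        ((PySem.List.enumerate xs (r : Int)).foldl
            (fun dd p => dd.insert p.2 (col * 20, p.1 * 12)) d,
         if r + xs.length = 12 then (col + 1, 0) else (col, ((r + xs.length : Nat) : Int))) := by
  induction xs with
  | nil =>
    intro d col r h hlt
    simp only [List.foldl_nil, PySem.List.enumerate_nil, List.length_nil, Nat.add_zero]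
    rw [if_neg (by omega)]
  | cons x t ih =>
    intro d col r h hlt
    rw [PySem.List.enumerate_cons]
    simp only [List.foldl_cons]
    by_cases hr : r + 1 < 12
    · have hstep : pcgStepA (d, col, (r : Int)) x =
          (d.insert x (col * 20, (r : Int) * 12), col, ((r + 1 : Nat) : Int)) := by
        simp only [pcgStepA]
        rw [if_neg (by omega)]
        push_cast; ring_nf
      rw [hstep]
      have hI := ih (d.insert x (col * 20, (r : Int) * 12)) col (r + 1)
        (by simp only [List.length_cons] at h; omega) hr
      push_cast at hI
      simp only [List.length_cons]
      push_cast
      rw [hI]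
      split_ifs with h1 h2
      · rfl
      · exfalso; omega
      · exfalso; omega
      · simp only [Prod.mk.injEq, true_and]
        ring
    · -- then r = 11 and t = [] : the column fills up at this element
      have hr11 : r = 11 ∧ t.length = 0 := by simp only [List.length_cons] at h; omega
      have ht : t = [] := List.eq_nil_of_length_eq_zero hr11.2
      subst ht
      have hstep : pcgStepA (d, col, (r : Int)) x =
          (d.insert x (col * 20, (r : Int) * 12), col + 1, 0) := by
        simp only [pcgStepA]
        rw [if_pos (by omega)]
      rw [hstep]
      simp only [PySem.List.enumerate_nil, List.foldl_nil, List.length_cons,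
        List.length_nil, Nat.zero_add]
      rw [if_pos (by omega)]

-- A's whole fold over the tail from index 'start' (row counter 0) computes B's chunk loop.
theorem pcg_slice (cells : List String) (start : Nat) :
    PySem.List.slice cells (some (start : Int)) (some ((start + 12 : Nat) : Int)) =
      (cells.drop start).take 12 := by
  rw [PySem.List.slice_natCast]; congr 1; omega

theorem pcg_main : ∀ (n : Nat) (cells : List String) (start : Nat), cells.length - start ≤ n →
    ∀ (d : PySem.Dict String (Int × Int)) (col : Int),
      ((cells.drop start).foldl pcgStepA (d, col, 0)).1 = pcgChunks cells start col d := by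
  intro n
  induction n with
  | zero =>
    intro cells start hlen d col
    rw [pcgChunks, dif_neg (by omega), List.drop_eq_nil_of_le (by omega)]
    rfl
  | succ n ih =>
    intro cells start hlen d col
    by_cases hlt : start < cells.length
    · rw [pcgChunks, dif_pos hlt]
      conv_lhs => rw [← List.take_append_drop 12 (cells.drop start), List.foldl_append]
      have htk : ((cells.drop start).take 12).length ≤ 12 := by simp
      have h0 : (0 : Int) = ((0 : Nat) : Int) := rfl
      rw [h0, pcg_chunk ((cells.drop start).take 12) d col 0 (by omega) (by omega)]
      rw [List.drop_drop, pcg_slice]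
      by_cases hge : 12 ≤ cells.length - start
      · have hlen12 : ((cells.drop start).take 12).length = 12 := by simp; omega
        rw [if_pos (by omega)]
        have := ih cells (start + 12) (by omega) (pcgColumn col d ((cells.drop start).take 12)) (col + 1)
        exact this
      · have htake : (cells.drop start).take 12 = cells.drop start := by
          apply List.take_of_length_le; simp; omega
        have hdrop : cells.drop (start + 12) = [] := List.drop_eq_nil_of_le (by omega)
        rw [htake, hdrop, if_neg (by simp; omega)]
        rw [pcgChunks, dif_neg (by omega)]
        simp [pcgColumn]
    · rw [pcgChunks, dif_neg hlt, List.drop_eq_nil_of_le (by omega)]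
      rfl

-- ===== VERDICT (by name: the statement is the Claim_ definition above) =====
theorem place_cells_grid_spec : Claim_equal_place_cells_grid := by
  intro cells _
  unfold Spec_place_cells_grid place_cells_grid place_cells_grid_alt
  have := pcg_main cells.length cells 0 (by omega) PySem.Dict.empty 0
  rw [List.drop_zero] at this
  exact congrArg PySem.Dict.items this
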